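-- pv_equiv track=rewrite | github.com/ufnalbartosz/dotfiles | scripts/gen-keybindings-doc.py | pretty_key
-- ===== SOURCE A (Python) =====
-- MOD_MAP = {
--     "ctrl": "Ctrl", "cmd": "Cmd", "shift": "Shift",
--     "alt": "Alt", "opt": "Opt", "meta": "Meta",
-- }
--
-- def pretty_key(key):
--     """Turn 'ctrl+x ctrl+shift+p' into 'Ctrl+X Ctrl+Shift+P'."""
--     chords = []
--     for chord in key.split():
--         segs = []
--         for seg in chord.split("+"):
--             low = seg.lower()
--             if low in MOD_MAP:
--                 segs.append(MOD_MAP[low])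
--             elif len(seg) == 1:
--                 segs.append(seg.upper())
--             else:
--                 segs.append(seg)
--         chords.append("+".join(segs))
--     return " ".join(chords)
-- ===== SOURCE B (Python) =====
-- MOD_MAP = {
--     "ctrl": "Ctrl", "cmd": "Cmd", "shift": "Shift",
--     "alt": "Alt", "opt": "Opt", "meta": "Meta",
-- }
--
-- def _cap(tok):
--     low = tok.lower()
--     if low in MOD_MAP:
--         return MOD_MAP[low]
--     if len(tok) == 1:
--         return tok.upper()
--     return tok
--
-- def pretty_key(key):
--     """Turn 'ctrl+x ctrl+shift+p' into 'Ctrl+X Ctrl+Shift+P' in one left-to-right pass over the characters (no split/join passes)."""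
--     chords = []
--     segs = []
--     tok = ""
--     in_chord = False
--     for ch in key:
--         if ch.isspace():
--             if in_chord:
--                 segs.append(_cap(tok))
--                 chords.append("+".join(segs))
--                 segs = []
--                 tok = ""
--                 in_chord = False
--         elif ch == "+":
--             segs.append(_cap(tok))
--             tok = ""
--             in_chord = True
--         else:
--             tok += ch
--             in_chord = True
--     if in_chord:
--         segs.append(_cap(tok))
--         chords.append("+".join(segs))
--     return " ".join(chords)
-- ===== Notes on version B (the rewrite author's own statement) =====
-- stated objective: alternative
-- what changed: Replaces A's nested whitespace-split and chord-split passes with a single left-to-right character scan that maintains the current token, the capitalized segments of the current chord and the output chords in one pass.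
import Mathlib
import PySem

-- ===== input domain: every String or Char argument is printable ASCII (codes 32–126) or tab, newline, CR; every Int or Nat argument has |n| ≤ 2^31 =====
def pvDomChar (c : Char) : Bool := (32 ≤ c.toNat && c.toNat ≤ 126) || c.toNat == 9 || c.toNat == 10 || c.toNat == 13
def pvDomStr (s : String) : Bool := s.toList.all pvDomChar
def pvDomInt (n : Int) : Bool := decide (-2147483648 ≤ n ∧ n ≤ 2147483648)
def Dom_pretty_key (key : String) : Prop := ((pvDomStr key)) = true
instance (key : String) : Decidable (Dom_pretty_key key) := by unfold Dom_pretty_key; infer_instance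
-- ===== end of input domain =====

-- B replaces A's nested split/join passes by a single left-to-right character scan (objective: alternative, same cost).

-- ===== PORT A =====
def MOD_MAP : PySem.Dict (List Char) (List Char) :=
  PySem.Dict.mk [("ctrl".toList, "Ctrl".toList), ("cmd".toList, "Cmd".toList),
                 ("shift".toList, "Shift".toList), ("alt".toList, "Alt".toList),
                 ("opt".toList, "Opt".toList), ("meta".toList, "Meta".toList)]

def pretty_key (key : String) : String :=
  let chords := (PySem.Chars.split₀ key.toList).foldl (fun chords chord =>
    let segs := (PySem.Chars.splitOn chord ['+']).foldl (fun segs seg =>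
      let low := PySem.Chars.lower seg
      if MOD_MAP.contains low then segs ++ [ MOD_MAP.getD low []]
      else if PySem.Chars.len seg == 1 then segs ++ [PySem.Chars.upper seg]
      else segs ++ [seg]) ([] : List (List Char))
    chords ++ [PySem.Chars.join ['+'] segs]) ([] : List (List Char))
  String.ofList (PySem.Chars.join [' '] chords)

-- ===== PORT B =====
def MOD_MAP_alt : PySem.Dict (List Char) (List Char) :=
  PySem.Dict.mk [("ctrl".toList, "Ctrl".toList), ("cmd".toList, "Cmd".toList),
                 ("shift".toList, "Shift".toList), ("alt".toList, "Alt".toList),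
                 ("opt".toList, "Opt".toList), ("meta".toList, "Meta".toList)]

def cap_alt (tok : List Char) : List Char :=
  let low := PySem.Chars.lower tok
  if MOD_MAP_alt.contains low then MOD_MAP_alt.getD low []
  else if PySem.Chars.len tok == 1 then PySem.Chars.upper tok
  else tok

def step_alt (st : List (List Char) × List (List Char) × List Char × Bool) (c : Char) :
    List (List Char) × List (List Char) × List Char × Bool :=
  let (chords, segs, tok, inch) := st
  if PySem.Chars.isspace c then
    (if inch then (chords ++ [PySem.Chars.join ['+'] (segs ++ [cap_alt tok])], [], [], false)
     else (chords, segs, tok, inch))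
  else if c = '+' then (chords, segs ++ [cap_alt tok], [], true)
  else (chords, segs, tok ++ [c], true)

def pretty_key_alt (key : String) : String :=
  let st := key.toList.foldl step_alt ([], [], [], false)
  let chords := if st.2.2.2 then st.1 ++ [PySem.Chars.join ['+'] (st.2.1 ++ [cap_alt st.2.2.1])] else st.1
  String.ofList (PySem.Chars.join [' '] chords)

-- ===== PRECONDITION & SPEC =====
def Spec_pretty_key (key : String) (out : String) : Prop := out = pretty_key_alt key
instance (key : String) (out : String) : Decidable (Spec_pretty_key key out) := by unfold Spec_pretty_key; infer_instance

-- ===== CLAIM (what is proved, stated in full; the proofs are below) =====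
def Claim_equal_pretty_key : Prop := ∀ (key : String), Dom_pretty_key key → Spec_pretty_key key (pretty_key key)

-- ===== LEMMAS AND PROOFS =====

/-- `str.split()` as a plain recursion: drop whitespace, peel one maximal non-space word. -/
def Wsplit : List Char → List (List Char)
  | [] => []
  | c :: rest =>
    if PySem.Chars.isspace c then Wsplit rest
    else (c :: rest.takeWhile (fun x => !PySem.Chars.isspace x)) ::
         Wsplit (rest.dropWhile (fun x => !PySem.Chars.isspace x))
termination_by cs => cs.length
decreasing_by
  · simp
  · have := List.length_dropWhile_le (fun x => !PySem.Chars.isspace x) rest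
    simp; omega

/-- `s.split("+")` as head/tail of a structural recursion. -/
def Scut : List Char → List Char × List (List Char)
  | [] => ([], [])
  | c :: rest =>
    let p := Scut rest
    if c = '+' then ([], p.1 :: p.2) else (c :: p.1, p.2)

/-- what A computes per word -/
def chordB (w : List Char) : List Char :=
  PySem.Chars.join ['+'] (((Scut w).1 :: (Scut w).2).map cap_alt)

lemma split0_go_W (cs : List Char) : ∀ (cur : List Char) (acc : List (List Char)),
    PySem.Chars.split₀.go cs cur acc =
      acc.reverse ++ (if cur = [] then Wsplit cs
        else (cur.reverse ++ cs.takeWhile (fun x => !PySem.Chars.isspace x)) ::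
             Wsplit (cs.dropWhile (fun x => !PySem.Chars.isspace x))) := by
  induction cs with
  | nil =>
    intro cur acc
    rcases cur with _ | ⟨c, cur⟩ <;> simp [PySem.Chars.split₀.go, Wsplit]
  | cons c rest ih =>
    intro cur acc
    by_cases hc : PySem.Chars.isspace c
    · rcases cur with _ | ⟨d, cur⟩
      · simp [PySem.Chars.split₀.go, hc, ih, Wsplit]
      · simp [PySem.Chars.split₀.go, hc, ih, Wsplit, List.takeWhile, List.dropWhile]
    · have h2 := ih (c :: cur) acc
      simp [PySem.Chars.split₀.go, hc] at h2 ⊢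
      rw [h2]
      rcases cur with _ | ⟨d, cur⟩ <;>
        simp [Wsplit, hc]

lemma split0_eq_W (cs : List Char) : PySem.Chars.split₀ cs = Wsplit cs := by
  simpa using split0_go_W cs [] []

lemma splitOn_go_S : ∀ (fuel : Nat) (l cur : List Char) (acc : List (List Char)), l.length < fuel →
    PySem.Chars.splitOn.go ['+'] fuel l cur acc =
      acc.reverse ++ (cur.reverse ++ (Scut l).1) :: (Scut l).2 := by
  intro fuel
  induction fuel with
  | zero => intro l cur acc h; omega
  | succ n ih =>
    intro l cur acc h
    rcases l with _ | ⟨c, rest⟩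
    · simp [PySem.Chars.splitOn.go, Scut]
    · by_cases hc : c = '+'
      · subst hc
        rw [show PySem.Chars.splitOn.go ['+'] (n+1) ('+' :: rest) cur acc =
              PySem.Chars.splitOn.go ['+'] n rest [] (cur.reverse :: acc) by
            simp [PySem.Chars.splitOn.go, List.isPrefixOf]]
        rw [ih rest [] (cur.reverse :: acc) (by simp at h; omega)]
        simp [Scut]
      · rw [show PySem.Chars.splitOn.go ['+'] (n+1) (c :: rest) cur acc =
              PySem.Chars.splitOn.go ['+'] n rest (c :: cur) acc by
            simp [PySem.Chars.splitOn.go, List.isPrefixOf]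
            intro h; exact absurd h.symm hc]
        rw [ih rest (c :: cur) acc (by simp at h; omega)]
        simp [Scut, hc]

lemma splitOn_eq_S (cs : List Char) :
    PySem.Chars.splitOn cs ['+'] = (Scut cs).1 :: (Scut cs).2 := by
  have := splitOn_go_S (cs.length + 1) cs [] [] (by omega)
  simpa [PySem.Chars.splitOn] using this

lemma Scut_append (tok w : List Char) (h : '+' ∉ tok) :
    Scut (tok ++ w) = (tok ++ (Scut w).1, (Scut w).2) := by
  induction tok with
  | nil => simp
  | cons c tok ih =>
    have hc : c ≠ '+' := by intro e; exact h (by simp [e])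
    simp [Scut, hc, ih (by intro hm; exact h (List.mem_cons_of_mem _ hm))]

lemma Scut_no_plus (tok : List Char) (h : '+' ∉ tok) : Scut tok = (tok, []) := by
  have := Scut_append tok [] h
  simpa [Scut] using this

/-- A's nested fold is `chordB` mapped over the Python-split words. -/
lemma A_chords (cs : List Char) :
    (PySem.Chars.split₀ cs).foldl (fun chords chord =>
      chords ++ [PySem.Chars.join ['+'] ((PySem.Chars.splitOn chord ['+']).foldl (fun segs seg =>
        if MOD_MAP.contains (PySem.Chars.lower seg) then segs ++ [ MOD_MAP.getD (PySem.Chars.lower seg) []]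
        else if PySem.Chars.len seg == 1 then segs ++ [PySem.Chars.upper seg]
        else segs ++ [seg]) [])]) [] = (Wsplit cs).map chordB := by
  have hseg : (fun (segs : List (List Char)) (seg : List Char) =>
      if MOD_MAP.contains (PySem.Chars.lower seg) then segs ++ [ MOD_MAP.getD (PySem.Chars.lower seg) []]
      else if PySem.Chars.len seg == 1 then segs ++ [PySem.Chars.upper seg]
      else segs ++ [seg]) = (fun segs seg => segs ++ [cap_alt seg]) := by
    funext segs seg
    simp only [cap_alt, MOD_MAP, MOD_MAP_alt]
    split_ifs <;> rfl
  have hstep : (fun (chords : List (List Char)) (chord : List Char) =>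
      chords ++ [PySem.Chars.join ['+'] ((PySem.Chars.splitOn chord ['+']).foldl (fun segs seg =>
        if MOD_MAP.contains (PySem.Chars.lower seg) then segs ++ [ MOD_MAP.getD (PySem.Chars.lower seg) []]
        else if PySem.Chars.len seg == 1 then segs ++ [PySem.Chars.upper seg]
        else segs ++ [seg]) [])]) = (fun chords chord => chords ++ [chordB chord]) := by
    funext chords chord
    rw [hseg]
    rw [show (PySem.Chars.splitOn chord ['+']).foldl (fun segs seg => segs ++ [cap_alt seg]) [] =
          (PySem.Chars.splitOn chord ['+']).map cap_alt by
      simpa using PySem.List.foldl_append_singleton_eq_map cap_alt (PySem.Chars.splitOn chord ['+']) []]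
    rw [chordB, splitOn_eq_S]
  rw [hstep]
  rw [show ∀ (l : List (List Char)), l.foldl (fun chords chord => chords ++ [chordB chord]) [] = l.map chordB from
    fun l => by simpa using PySem.List.foldl_append_singleton_eq_map chordB l []]
  rw [split0_eq_W]

/-- Main invariant of B's single pass. -/
lemma inv_B (cs : List Char) : ∀ (chords segs : List (List Char)) (tok : List Char) (inch : Bool),
    '+' ∉ tok → (inch = false → segs = [] ∧ tok = []) →
    (let st := cs.foldl step_alt (chords, segs, tok, inch)
     if st.2.2.2 then st.1 ++ [PySem.Chars.join ['+'] (st.2.1 ++ [cap_alt st.2.2.1])] else st.1) =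
    chords ++ (if inch then
        (PySem.Chars.join ['+'] (segs ++
          (((Scut (tok ++ cs.takeWhile (fun x => !PySem.Chars.isspace x))).1 ::
            (Scut (tok ++ cs.takeWhile (fun x => !PySem.Chars.isspace x))).2).map cap_alt)))
          :: (Wsplit (cs.dropWhile (fun x => !PySem.Chars.isspace x))).map chordB
      else (Wsplit cs).map chordB) := by
  induction cs with
  | nil =>
    intro chords segs tok inch hplus hzero
    cases inch
    · obtain ⟨h1, h2⟩ := hzero rfl
      simp [h1, h2, Wsplit]
    · simp [Scut_no_plus tok hplus, Wsplit]
  | cons c rest ih =>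
    intro chords segs tok inch hplus hzero
    by_cases hsp : PySem.Chars.isspace c
    · cases inch
      · obtain ⟨h1, h2⟩ := hzero rfl
        have := ih chords segs tok false hplus hzero
        simp only [List.foldl_cons, step_alt, hsp, if_pos] at this ⊢
        simp [] at this ⊢
        rw [this]
        simp [Wsplit, hsp]
      · have := ih (chords ++ [PySem.Chars.join ['+'] (segs ++ [cap_alt tok])]) [] [] false
          (by simp) (by simp)
        simp only [List.foldl_cons, step_alt, hsp, if_pos] at this ⊢
        simp [hsp] at this ⊢
        rw [this]
        simp [Wsplit, hsp, Scut_no_plus tok hplus]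
    · by_cases hpl : c = '+'
      · subst hpl
        have hplus' : ('+' : Char) ∉ ([] : List Char) := by simp
        have := ih chords (segs ++ [cap_alt tok]) [] true hplus' (by simp)
        simp only [List.foldl_cons, step_alt, hsp] at this ⊢
        simp [hsp] at this ⊢
        rw [this]
        have hne : (PySem.Chars.isspace '+') = false := by decide
        cases inch
        · obtain ⟨h1, h2⟩ := hzero rfl
          subst h1; subst h2
          simp [Wsplit, hsp, chordB, Scut]
        · simp [Scut_append tok ('+' :: rest.takeWhile (fun x => !PySem.Chars.isspace x)) hplus, Scut]
      · have hplus' : ('+' : Char) ∉ tok ++ [c] := by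
          intro hm; rcases List.mem_append.mp hm with h | h
          · exact hplus h
          · simp at h; exact hpl h.symm
        have := ih chords segs (tok ++ [c]) true hplus' (by simp)
        simp only [List.foldl_cons, step_alt, hsp, hpl] at this ⊢
        simp [hsp] at this ⊢
        rw [this]
        cases inch
        · obtain ⟨h1, h2⟩ := hzero rfl
          subst h1; subst h2
          simp [Wsplit, hsp, chordB]
        · simp []


/-- B's pass, finalized, yields the same chord list. -/
lemma B_chords (cs : List Char) :
    (if (cs.foldl step_alt ([], [], [], false)).2.2.2 then
        (cs.foldl step_alt ([], [], [], false)).1 ++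
          [PySem.Chars.join ['+'] ((cs.foldl step_alt ([], [], [], false)).2.1 ++
            [cap_alt (cs.foldl step_alt ([], [], [], false)).2.2.1])]
      else (cs.foldl step_alt ([], [], [], false)).1) = (Wsplit cs).map chordB := by
  have := inv_B cs [] [] [] false (by simp) (by simp)
  simpa using this

-- ===== VERDICT (by name: the statement is the Claim_ definition above) =====
theorem pretty_key_spec : Claim_equal_pretty_key := by
  intro key _
  show pretty_key key = pretty_key_alt key
  simp only [pretty_key, pretty_key_alt]
  rw [A_chords, B_chords]
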